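-- pv_equiv track=rewrite | github.com/lexterslab/orthostudio | analyze_deltas_v5.py | _dedup_varnames
-- ===== SOURCE A (Python) =====
-- def _vn(s):
--     return "".join(c if c.isalnum() else "_" for c in s).strip("_").lower()[:30]
--
-- def _dedup_varnames(names_list):
--     vns = [_vn(s) for s in names_list]
--     seen = {}
--     for i, v in enumerate(vns):
--         if v in seen:
--             seen[v] += 1
--             vns[i] = f"{v}_{seen[v]}"
--         else:
--             seen[v] = 0
--     return vns
-- ===== SOURCE B (Python) =====
-- def _vn(s):
--     return "".join(c if c.isalnum() else "_" for c in s).strip("_").lower()[:30]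
--
-- def _dedup_varnames(names_list):
--     vns = [_vn(s) for s in names_list]
--     groups = {}
--     for i, v in enumerate(vns):
--         groups.setdefault(v, []).append(i)
--     for v, idxs in groups.items():
--         for k, i in enumerate(idxs[1:], 1):
--             vns[i] = f"{v}_{k}"
--     return vns
-- ===== Notes on version B (the rewrite author's own statement) =====
-- stated objective: alternative
-- what changed: A decides each name's suffix on the fly with a running collision-counter dict; B first gathers, in one pass, the list of indices of every sanitized name into a dict of index groups, then in a second pass numbers each group's later occurrences _1, _2, ...
import Mathlib
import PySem

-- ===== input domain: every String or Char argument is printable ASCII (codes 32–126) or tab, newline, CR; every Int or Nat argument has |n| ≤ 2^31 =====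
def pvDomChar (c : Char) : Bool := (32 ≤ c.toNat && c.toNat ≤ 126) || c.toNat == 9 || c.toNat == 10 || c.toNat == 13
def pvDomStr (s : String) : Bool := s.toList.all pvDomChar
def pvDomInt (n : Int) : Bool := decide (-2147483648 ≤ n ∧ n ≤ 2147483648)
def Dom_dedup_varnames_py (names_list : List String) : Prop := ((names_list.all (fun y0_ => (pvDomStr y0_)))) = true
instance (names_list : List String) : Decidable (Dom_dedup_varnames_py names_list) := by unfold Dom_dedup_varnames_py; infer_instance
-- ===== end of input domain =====

-- B replaces A's decide-on-the-fly pass (a running collision counter consulted at each element) by a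
-- gather-then-assign decomposition: first group the indices of each sanitized name, then number each
-- group's later occurrences; same return value, same cost (objective: alternative).

-- ===== PORT A =====
-- _vn, shared verbatim by both Pythons: "".join(c if c.isalnum() else "_" for c in s).strip("_").lower()[:30]
def sanitizeName (s : String) : String :=
  PySem.Str.slice (PySem.Str.lower (PySem.Str.stripChars
    (PySem.Str.join "" (s.toList.map (fun c => if PySem.Chars.isalnum c then String.ofList [c] else "_"))) "_")) none (some 30)

-- A's loop 'for i, v in enumerate(vns): …' only ever rewrites vns[i] at the current position,
-- so it is the structural recursion over the list with the dict 'seen' as accumulator.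
def dedupLoop (seen : PySem.Dict String Int) : List String → List String
  | [] => []
  | v :: rest =>
    match seen.get? v with
    | some n => (v ++ "_" ++ PySem.Int.toStr (n + 1)) :: dedupLoop (seen.insert v (n + 1)) rest
    | none => v :: dedupLoop (seen.insert v 0) rest

def dedup_varnames_py (names_list : List String) : List String :=
  dedupLoop PySem.Dict.empty (names_list.map sanitizeName)

-- ===== PORT B =====
-- pass 1: groups[v] = the list of indices i with vns[i] == v, in input order;
-- pass 2: for each group, number the later indices idxs[1:] with suffixes _1, _2, …
-- (the indices come from enumerate, hence are ≥ 0: '.toNat' is exact here)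
def dedup_varnames_py_alt (names_list : List String) : List String :=
  let vns := names_list.map sanitizeName
  let groups := (PySem.List.enumerate vns).foldl
      (fun d p => d.modify p.2 [] (fun l => l ++ [p.1])) PySem.Dict.empty
  groups.items.foldl (fun out g =>
      (PySem.List.enumerate (PySem.List.slice g.2 (some 1) none) 1).foldl
        (fun out2 ki => out2.set ki.2.toNat (g.1 ++ "_" ++ PySem.Int.toStr ki.1)) out)
    vns

-- ===== PRECONDITION & SPEC =====
def Spec_dedup_varnames_py (names_list : List String) (out : List String) : Prop := out = dedup_varnames_py_alt names_list
instance (names_list : List String) (out : List String) : Decidable (Spec_dedup_varnames_py names_list out) := by unfold Spec_dedup_varnames_py; infer_instance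

-- ===== CLAIM (what is proved, stated in full; the proofs are below) =====
def Claim_equal_dedup_varnames_py : Prop := ∀ (names_list : List String), Dom_dedup_varnames_py names_list → Spec_dedup_varnames_py names_list (dedup_varnames_py names_list)

-- ===== LEMMAS AND PROOFS =====

-- the common specification: element j stays v = vns[j] if no earlier element sanitized to v,
-- and becomes v ++ "_" ++ str(c) when c > 0 earlier elements did (p is the consumed prefix).
def renameStr (v : String) (c : Nat) : String := v ++ "_" ++ PySem.Int.toStr (c : Int)

def specGo : List String → List String → List String
  | _, [] => []
  | p, v :: rest => (if p.count v = 0 then v else renameStr v (p.count v)) :: specGo (p ++ [v]) rest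

def targetAt (vns : List String) (j : Nat) (v : String) : String :=
  if (vns.take j).count v = 0 then v else renameStr v ((vns.take j).count v)

-- occG s xs v: the indices (as Python ints, numbered from s) at which xs holds v
def occG (s : Int) (xs : List String) (v : String) : List Int :=
  ((PySem.List.enumerate xs s).filter (fun p => p.2 == v)).map (·.1)

-- ---- A-side: the running-counter loop computes specGo ----
theorem dedupLoop_eq_specGo (rest : List String) : ∀ (seen : PySem.Dict String Int) (p : List String),
    (∀ v, seen.get? v = if p.count v = 0 then none else some ((p.count v : Int) - 1)) →
    dedupLoop seen rest = specGo p rest := by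
  induction rest with
  | nil => intro seen p _; rfl
  | cons v r ih =>
    intro seen p hinv
    have hv := hinv v
    have hstep : ∀ w, ((p ++ [v]).count w : Nat) = p.count w + (if v = w then 1 else 0) := by
      intro w; rw [List.count_append]; simp [List.count_singleton, beq_iff_eq]
    by_cases hc : p.count v = 0
    · rw [if_pos hc] at hv
      simp only [dedupLoop, hv, specGo, if_pos hc]
      congr 1
      apply ih
      intro w
      rw [hstep w]
      by_cases hw : v = w
      · subst hw
        rw [PySem.Dict.get?_insert_self]
        simp [hc]
      · rw [PySem.Dict.get?_insert_of_ne _ _ (fun h => hw h.symm), hinv w]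
        simp [hw]
    · rw [if_neg hc] at hv
      simp only [dedupLoop, hv, specGo, if_neg hc]
      have harg : (p.count v : Int) - 1 + 1 = (p.count v : Int) := by ring
      rw [harg]
      congr 1
      apply ih
      intro w
      rw [hstep w]
      by_cases hw : v = w
      · subst hw
        rw [PySem.Dict.get?_insert_self]
        rw [if_pos rfl, if_neg (by omega : ¬ p.count v + 1 = 0)]
        congr 1
        push_cast
        ring
      · rw [PySem.Dict.get?_insert_of_ne _ _ (fun h => hw h.symm), hinv w]
        simp [hw]

theorem specGo_getElem? (rest : List String) : ∀ (p : List String) (j : Nat),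
    (specGo p rest)[j]? = rest[j]?.map (fun v =>
      if p.count v + (rest.take j).count v = 0 then v
      else renameStr v (p.count v + (rest.take j).count v)) := by
  induction rest with
  | nil => intro p j; simp [specGo]
  | cons v r ih =>
    intro p j
    cases j with
    | zero => simp [specGo]
    | succ j' =>
      simp only [specGo, List.getElem?_cons_succ, List.take_succ_cons]
      rw [ih (p ++ [v]) j']
      cases hr : r[j']? with
      | none => simp
      | some w =>
        simp only [Option.map_some]
        congr 1
        have : (p ++ [v]).count w = p.count w + List.count w [v] := List.count_append ..
        rw [List.count_cons]
        rw [this]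
        simp [List.count_singleton]
        by_cases hvw : v = w
        · simp [hvw]
          ring_nf
        · simp [hvw]

-- ---- B-side: facts about the index groups ----

theorem occG_cons (s : Int) (x : String) (xs : List String) (v : String) :
    occG s (x :: xs) v = (if x == v then [(s : Int)] else []) ++ occG (s + 1) xs v := by
  simp only [occG, PySem.List.enumerate_cons, List.filter_cons]
  split <;> simp_all

theorem occG_lb (xs : List String) : ∀ (s : Int) (v : String), ∀ x ∈ occG s xs v, s ≤ x := by
  induction xs with
  | nil => intro s v x hx; simp [occG, PySem.List.enumerate_nil] at hx
  | cons y ys ih =>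
    intro s v x hx
    rw [occG_cons] at hx
    rcases List.mem_append.1 hx with h | h
    · split at h <;> simp_all
    · have := ih (s + 1) v x h; omega

theorem occG_pairwise (xs : List String) : ∀ (s : Int) (v : String), (occG s xs v).Pairwise (· < ·) := by
  induction xs with
  | nil => intro s v; simp [occG, PySem.List.enumerate_nil]
  | cons y ys ih =>
    intro s v
    rw [occG_cons]
    refine List.pairwise_append.2 ⟨?_, ih (s+1) v, ?_⟩
    · split <;> simp
    · intro a ha b hb
      have hb' := occG_lb ys (s+1) v b hb
      split at ha <;> simp_all

theorem occG_mem (xs : List String) : ∀ (s : Int) (v : String), ∀ x ∈ occG s xs v,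
    ∃ k : Nat, x = s + k ∧ xs[k]? = some v := by
  induction xs with
  | nil => intro s v x hx; simp [occG, PySem.List.enumerate_nil] at hx
  | cons y ys ih =>
    intro s v x hx
    rw [occG_cons] at hx
    rcases List.mem_append.1 hx with h | h
    · by_cases hyv : (y == v) = true
      · rw [if_pos hyv] at h
        simp only [List.mem_singleton] at h
        exact ⟨0, by simp [h], by simp [eq_of_beq hyv]⟩
      · simp [hyv] at h
    · obtain ⟨k, hk1, hk2⟩ := ih (s+1) v x h
      exact ⟨k + 1, by push_cast; omega, by simpa using hk2⟩

theorem occG_getElem (xs : List String) : ∀ (s : Int) (v : String) (j : Nat), xs[j]? = some v →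
    (occG s xs v)[(xs.take j).count v]? = some (s + j) := by
  induction xs with
  | nil => intro s v j h; simp at h
  | cons y ys ih =>
    intro s v j h
    rw [occG_cons]
    cases j with
    | zero =>
      simp at h
      subst h
      simp
    | succ j' =>
      simp at h
      have := ih (s + 1) v j' h
      rw [List.take_succ_cons, List.count_cons]
      by_cases hyv : y = v
      · subst hyv
        simp only [beq_self_eq_true, if_pos]
        rw [List.getElem?_append_right (by simp)]
        simp only [List.length_singleton]
        simpa [add_assoc, add_comm, add_left_comm] using this
      · have : (y == v) = false := by simp [hyv]
        simp only [this, if_neg, Bool.false_eq_true, not_false_eq_true, List.nil_append]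
        simpa [add_assoc, add_comm, add_left_comm] using ih (s+1) v j' h

-- ---- a fold of single-index writes, pointwise ----

theorem foldl_set_length {α : Type} (l : List α) (f : α → Nat) (g : α → String) :
    ∀ out : List String, (l.foldl (fun o a => o.set (f a) (g a)) out).length = out.length := by
  induction l with
  | nil => intro out; rfl
  | cons b t ih => intro out; simp only [List.foldl_cons]; rw [ih]; simp

theorem foldl_set_getElem?_not_mem {α : Type} (l : List α) (f : α → Nat) (g : α → String) (j : Nat)
    (h : ∀ a ∈ l, f a ≠ j) : ∀ out : List String,
    (l.foldl (fun o a => o.set (f a) (g a)) out)[j]? = out[j]? := by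
  induction l with
  | nil => intro out; rfl
  | cons b t ih =>
    intro out
    simp only [List.foldl_cons]
    rw [ih (fun a ha => h a (List.mem_cons_of_mem _ ha))]
    exact List.getElem?_set_ne (h b (List.mem_cons_self ..))

theorem foldl_set_getElem?_mem {α : Type} (l : List α) (f : α → Nat) (g : α → String) (j : Nat) :
    ∀ out : List String, (l.map f).Nodup → ∀ a ∈ l, f a = j → j < out.length →
    (l.foldl (fun o a => o.set (f a) (g a)) out)[j]? = some (g a) := by
  induction l with
  | nil => intro _ _ a ha; simp at ha
  | cons b t ih =>
    intro out hnd a ha hfa hj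
    simp only [List.map_cons, List.nodup_cons] at hnd
    rcases List.mem_cons.1 ha with rfl | hat
    · simp only [List.foldl_cons]
      rw [foldl_set_getElem?_not_mem t f g j (fun c hc => by
        intro hc'; exact hnd.1 (hfa ▸ hc' ▸ List.mem_map_of_mem hc))]
      rw [hfa, List.getElem?_set_self' ]
      simp [hj]
    · simp only [List.foldl_cons]
      exact ih (out.set (f b) (g b)) hnd.2 a hat hfa (by simpa using hj)

-- ---- B-side: the assignment pass computes targetAt at every index ----

theorem group_writes_nodup (vns : List String) (v : String) :
    ((PySem.List.enumerate ((occG 0 vns v).drop 1) 1).map (fun ki => ki.2.toNat)).Nodup := by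
  have h2 : (PySem.List.enumerate ((occG 0 vns v).drop 1) 1).map (fun ki => ki.2.toNat)
      = ((occG 0 vns v).drop 1).map Int.toNat := by
    have := PySem.List.map_snd_enumerate ((occG 0 vns v).drop 1) 1
    calc (PySem.List.enumerate ((occG 0 vns v).drop 1) 1).map (fun ki => ki.2.toNat)
        = ((PySem.List.enumerate ((occG 0 vns v).drop 1) 1).map (fun ki => ki.2)).map Int.toNat := by
          rw [List.map_map]; rfl
      _ = _ := by rw [this]
  rw [h2]
  have hpw : ((occG 0 vns v).drop 1).Pairwise (· < ·) :=
    (occG_pairwise vns 0 v).sublist (List.drop_sublist 1 _)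
  have hlb : ∀ x ∈ (occG 0 vns v).drop 1, (0:Int) ≤ x := by
    intro x hx
    exact occG_lb vns 0 v x (List.mem_of_mem_drop hx)
  refine List.Nodup.map_on ?_ (hpw.imp (fun h => ne_of_lt h))
  intro x hx y hy hxy
  have h1 := hlb x hx
  have h2 := hlb y hy
  omega

theorem outer_fold (vns : List String) : ∀ (gs : List String), gs.Nodup →
    ∀ out : List String, out.length = vns.length →
    (∀ (j : Nat) (v : String), vns[j]? = some v →
        out[j]? = some (if v ∈ gs then v else targetAt vns j v)) →
    (gs.foldl (fun o v =>
        (PySem.List.enumerate ((occG 0 vns v).drop 1) 1).foldl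
          (fun out2 ki => out2.set ki.2.toNat (v ++ "_" ++ PySem.Int.toStr ki.1)) o) out).length = vns.length ∧
    ∀ (j : Nat) (v : String), vns[j]? = some v →
      (gs.foldl (fun o v =>
        (PySem.List.enumerate ((occG 0 vns v).drop 1) 1).foldl
          (fun out2 ki => out2.set ki.2.toNat (v ++ "_" ++ PySem.Int.toStr ki.1)) o) out)[j]? = some (targetAt vns j v) := by
  intro gs
  induction gs with
  | nil =>
    intro _ out hlen hinv
    refine ⟨hlen, ?_⟩
    intro j v hjv
    simpa using hinv j v hjv
  | cons v0 gs' ih =>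
    intro hnd out hlen hinv
    simp only [List.nodup_cons] at hnd
    simp only [List.foldl_cons]
    set out' := (PySem.List.enumerate ((occG 0 vns v0).drop 1) 1).foldl
          (fun out2 ki => out2.set ki.2.toNat (v0 ++ "_" ++ PySem.Int.toStr ki.1)) out with hout'
    have hlen' : out'.length = vns.length := by
      rw [hout']
      rw [foldl_set_length (PySem.List.enumerate ((occG 0 vns v0).drop 1) 1)
        (fun ki => ki.2.toNat) (fun ki => v0 ++ "_" ++ PySem.Int.toStr ki.1) out]
      exact hlen
    refine ih hnd.2 out' hlen' ?_
    intro j v hjv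
    have hj : j < vns.length := by
      have := List.getElem?_eq_some_iff.1 hjv
      exact this.1
    have hjo : j < out.length := by omega
    by_cases hvv : v = v0
    · subst hvv
      have hvgs' : (v ∈ gs') = False := by simp [hnd.1]
      simp only [hvgs', if_false]
      by_cases hc : (vns.take j).count v = 0
      · -- first occurrence: index j is the head of occG, untouched by the writes over drop 1
        have h0 := occG_getElem vns 0 v j hjv
        rw [hc] at h0
        simp only [zero_add] at h0
        obtain ⟨a, tail, hocc⟩ : ∃ a tail, occG 0 vns v = a :: tail := by
          cases hh : occG 0 vns v with
          | nil => rw [hh] at h0; simp at h0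
          | cons a tail => exact ⟨a, tail, rfl⟩
        rw [hocc] at h0
        simp only [List.getElem?_cons_zero, Option.some.injEq] at h0
        have hpw := occG_pairwise vns 0 v
        rw [hocc] at hpw
        have htail : ∀ x ∈ tail, (j : Int) < x := by
          intro x hx
          have := (List.pairwise_cons.1 hpw).1 x hx
          omega
        have hne : ∀ ki ∈ PySem.List.enumerate ((occG 0 vns v).drop 1) 1, ki.2.toNat ≠ j := by
          intro ki hki
          have h2 : ki.2 ∈ (occG 0 vns v).drop 1 := by
            obtain ⟨k, hk, rfl⟩ := (PySem.List.mem_enumerate_iff _ _ _).1 hki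
            exact List.getElem_mem hk
          rw [hocc] at h2
          simp only [List.drop_one, List.tail_cons] at h2
          have := htail _ h2
          omega
        rw [hout']
        refine Eq.trans (foldl_set_getElem?_not_mem (PySem.List.enumerate ((occG 0 vns v).drop 1) 1) (fun ki => ki.2.toNat)
          (fun ki => v ++ "_" ++ PySem.Int.toStr ki.1) j hne out) ?_
        rw [hinv j v hjv]
        simp [targetAt, hc]
      · -- repeated occurrence: the write (c, j) is in the enumerate of drop 1
        set c := (vns.take j).count v with hcdef
        have hc1 : 1 ≤ c := by omega
        have hgg := PySem.List.getElem?_enumerate ((occG 0 vns v).drop 1) 1 (c - 1)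
        have hdrop : ((occG 0 vns v).drop 1)[c-1]? = (occG 0 vns v)[c]? := by
          rw [List.getElem?_drop]
          congr 1
          omega
        have hocc := occG_getElem vns 0 v j hjv
        rw [← hcdef] at hocc
        simp only [zero_add] at hocc
        rw [hdrop, hocc] at hgg
        have hmem : ((1 : Int) + ((c-1 : Nat) : Int), (j : Int)) ∈
            PySem.List.enumerate ((occG 0 vns v).drop 1) 1 := by
          exact List.mem_of_getElem? hgg
        rw [hout']
        refine Eq.trans (foldl_set_getElem?_mem (PySem.List.enumerate ((occG 0 vns v).drop 1) 1) (fun ki => ki.2.toNat)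
          (fun ki => v ++ "_" ++ PySem.Int.toStr ki.1) j out
          (group_writes_nodup vns v) _ hmem (by simp) hjo) ?_
        have harg : (1 : Int) + ((c-1 : Nat) : Int) = (c : Int) := by omega
        simp only [targetAt, ← hcdef, hc, if_false, renameStr, harg]
    · -- a different group never writes index j
      have hne : ∀ ki ∈ PySem.List.enumerate ((occG 0 vns v0).drop 1) 1, ki.2.toNat ≠ j := by
        intro ki hki
        have h2 : ki.2 ∈ (occG 0 vns v0).drop 1 := by
          obtain ⟨k, hk, rfl⟩ := (PySem.List.mem_enumerate_iff _ _ _).1 hki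
          exact List.getElem_mem hk
        have h3 : ki.2 ∈ occG 0 vns v0 := List.mem_of_mem_drop h2
        obtain ⟨k, hk1, hk2⟩ := occG_mem vns 0 v0 ki.2 h3
        intro hcon
        have : k = j := by omega
        rw [this] at hk2
        rw [hjv] at hk2
        exact hvv (by simpa using hk2)
      rw [hout']
      refine Eq.trans (foldl_set_getElem?_not_mem (PySem.List.enumerate ((occG 0 vns v0).drop 1) 1) (fun ki => ki.2.toNat)
        (fun ki => v0 ++ "_" ++ PySem.Int.toStr ki.1) j hne out) ?_
      rw [hinv j v hjv]
      simp [List.mem_cons, hvv]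

theorem alt_getElem? (names_list : List String) (j : Nat) :
    (dedup_varnames_py_alt names_list)[j]? =
      (names_list.map sanitizeName)[j]?.map (targetAt (names_list.map sanitizeName) j) := by
  set vns := names_list.map sanitizeName with hvns
  set groups := (PySem.List.enumerate vns).foldl
      (fun d p => d.modify p.2 [] (fun l => l ++ [p.1])) PySem.Dict.empty with hgroups
  have hkeys : groups.keys = PySem.List.dedup vns := by
    have h := PySem.Dict.keys_foldl_modify_key (PySem.List.enumerate vns 0) (fun p => p.2)
      ([] : List Int) (fun _ p => (fun t => t ++ [p.1])) PySem.Dict.empty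
    rw [hgroups]
    refine Eq.trans h ?_
    rw [PySem.List.map_snd_enumerate]
    simp [pysem]
  have hnodup : groups.keys.Nodup := by
    rw [hgroups]
    exact PySem.Dict.nodup_keys_foldl_modify_key (PySem.List.enumerate vns 0) (fun p => p.2)
      ([] : List Int) (fun _ p => (fun t => t ++ [p.1])) PySem.Dict.empty (by simp [pysem])
  have hgetD : ∀ v, groups.getD v [] = occG 0 vns v := by
    intro v
    have h1 : groups = ((PySem.List.enumerate vns 0).map (fun p => (p.2, p.1))).foldl
        (fun d q => d.modify q.1 [] (fun t => t ++ [q.2])) PySem.Dict.empty := by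
      rw [hgroups, List.foldl_map]
    rw [h1]
    rw [PySem.Dict.getD_foldl_modify_append]
    simp only [List.filter_map, List.map_map]
    simp [occG, Function.comp_def, pysem]
  have hitems : groups.items = (PySem.List.dedup vns).map (fun v => (v, occG 0 vns v)) := by
    rw [PySem.Dict.items_eq_map_keys groups hnodup [], hkeys]
    exact List.map_congr_left (fun v _ => by rw [hgetD v])
  show (groups.items.foldl (fun out g =>
      (PySem.List.enumerate (PySem.List.slice g.2 (some 1) none) 1).foldl
        (fun out2 ki => out2.set ki.2.toNat (g.1 ++ "_" ++ PySem.Int.toStr ki.1)) out)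
    vns)[j]? = vns[j]?.map (targetAt vns j)
  rw [hitems, List.foldl_map]
  have hslice : ∀ (v : String), PySem.List.slice (occG 0 vns v) (some 1) none = (occG 0 vns v).drop 1 := by
    intro v; rw [PySem.List.slice_from_one, ← List.drop_one]
  have hres := outer_fold vns (PySem.List.dedup vns) (PySem.List.nodup_dedup vns) vns rfl ?hinv
  case hinv =>
    intro j' v hjv
    rw [if_pos ((PySem.List.mem_dedup _ _).2 (List.mem_of_getElem? hjv))]
    exact hjv
  have hfold : ((PySem.List.dedup vns).foldl (fun o v =>
        (PySem.List.enumerate (PySem.List.slice (occG 0 vns v) (some 1) none) 1).foldl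
          (fun out2 ki => out2.set ki.2.toNat (v ++ "_" ++ PySem.Int.toStr ki.1)) o) vns)
      = ((PySem.List.dedup vns).foldl (fun o v =>
        (PySem.List.enumerate ((occG 0 vns v).drop 1) 1).foldl
          (fun out2 ki => out2.set ki.2.toNat (v ++ "_" ++ PySem.Int.toStr ki.1)) o) vns) := by
    congr 1
    funext o v
    rw [hslice v]
  refine Eq.trans (congrArg (fun l => l[j]?) hfold) ?_
  cases hj : vns[j]? with
  | none =>
    have : j ≥ vns.length := List.getElem?_eq_none_iff.1 hj
    simp only [Option.map_none]
    rw [List.getElem?_eq_none_iff]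
    rw [hres.1]
    omega
  | some v =>
    simpa using hres.2 j v hj

-- ===== VERDICT (by name: the statement is the Claim_ definition above) =====
theorem dedup_varnames_py_spec : Claim_equal_dedup_varnames_py := by
  intro names_list _
  unfold Spec_dedup_varnames_py
  have hA : dedup_varnames_py names_list = specGo [] (names_list.map sanitizeName) := by
    unfold dedup_varnames_py
    apply dedupLoop_eq_specGo
    intro v
    simp [pysem]
  apply List.ext_getElem?
  intro j
  rw [hA, specGo_getElem?, alt_getElem?]
  cases h : (names_list.map sanitizeName)[j]? <;> simp [targetAt]
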